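-- pv_equiv track=rewrite | github.com/nicolesel/Programacion1 | TP4/ej10.py | filtrar_palabras
-- ===== SOURCE A (Python) =====
-- def filtrar_palabras(frase,palabra,cambio):
--     contador = 0
--     nueva_frase = frase.split()
--     if palabra in nueva_frase:
--         for i in range(len(nueva_frase)):
--             if nueva_frase[i] == palabra:
--                 nueva_frase[i] = cambio
--                 contador += 1
--     nueva_frase = " ".join(nueva_frase)
--     return nueva_frase, contador
-- ===== SOURCE B (Python) =====
-- def filtrar_palabras(frase, palabra, cambio):
--     # Recursive descent over the word list: builds the joined string and the
--     # replacement count directly, no in-place mutation and no final join pass.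
--     def go(ws):
--         if not ws:
--             return "", 0
--         w0 = cambio if ws[0] == palabra else ws[0]
--         c0 = 1 if ws[0] == palabra else 0
--         if len(ws) == 1:
--             return w0, c0
--         resto, c = go(ws[1:])
--         return w0 + " " + resto, c0 + c
--     return go(frase.split())
-- ===== Notes on version B (the rewrite author's own statement) =====
-- stated objective: alternative
-- what changed: A mutates the split word list in place via an index loop (guarded by a membership pre-check) and joins at the end; B is a single structural recursion over the word list that builds the joined output string and the count directly, with no mutation, no index arithmetic and no separate join pass.
import Mathlib
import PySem

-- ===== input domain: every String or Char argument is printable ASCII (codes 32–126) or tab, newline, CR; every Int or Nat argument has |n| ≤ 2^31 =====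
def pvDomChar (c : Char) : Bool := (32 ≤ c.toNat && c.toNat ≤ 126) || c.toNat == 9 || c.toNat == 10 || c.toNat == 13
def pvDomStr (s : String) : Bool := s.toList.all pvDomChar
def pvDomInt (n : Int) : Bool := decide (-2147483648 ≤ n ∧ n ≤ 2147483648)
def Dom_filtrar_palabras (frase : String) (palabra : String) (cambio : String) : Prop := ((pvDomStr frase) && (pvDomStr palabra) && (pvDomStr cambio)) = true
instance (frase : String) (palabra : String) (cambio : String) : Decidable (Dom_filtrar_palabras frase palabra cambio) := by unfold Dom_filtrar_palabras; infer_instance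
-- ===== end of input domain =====

-- B replaces A's in-place index loop + final join by one structural recursion
-- that builds the joined string and the count together (objective: alternative).

-- ===== PORT A =====
def filtrar_palabras (frase : String) (palabra : String) (cambio : String) : String × Int :=
  let contador : Int := 0
  let nueva_frase := PySem.Str.split₀ frase
  let st :=
    if palabra ∈ nueva_frase then
      (PySem.List.pyRange 0 (nueva_frase.length) 1).foldl
        (fun (st : List String × Int) i =>
          if PySem.List.pyGet? st.1 i = some palabra then
            (st.1.set i.toNat cambio, st.2 + 1)
          else st)
        (nueva_frase, contador)
    else (nueva_frase, contador)
  (PySem.Str.join " " st.1, st.2)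

-- ===== PORT B =====
-- 'w0 + " " + resto' is ported exactly as PySem.Str.join " " [w0, resto].
def fpGo (palabra : String) (cambio : String) : List String → String × Int
  | [] => ("", 0)
  | [w] => (if w == palabra then cambio else w, if w == palabra then (1 : Int) else 0)
  | w :: r :: rest =>
      let w0 := if w == palabra then cambio else w
      let c0 : Int := if w == palabra then 1 else 0
      let p := fpGo palabra cambio (r :: rest)
      (PySem.Str.join " " [w0, p.1], c0 + p.2)

def filtrar_palabras_alt (frase : String) (palabra : String) (cambio : String) : String × Int :=
  fpGo palabra cambio (PySem.Str.split₀ frase)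

-- ===== PRECONDITION & SPEC =====
def Spec_filtrar_palabras (frase : String) (palabra : String) (cambio : String) (out : String × Int) : Prop := out = filtrar_palabras_alt frase palabra cambio
instance (frase : String) (palabra : String) (cambio : String) (out : String × Int) : Decidable (Spec_filtrar_palabras frase palabra cambio out) := by unfold Spec_filtrar_palabras; infer_instance

-- ===== CLAIM =====
def Claim_equal_filtrar_palabras : Prop := ∀ (frase : String) (palabra : String) (cambio : String), Dom_filtrar_palabras frase palabra cambio → Spec_filtrar_palabras frase palabra cambio (filtrar_palabras frase palabra cambio)

-- ===== LEMMAS AND PROOFS =====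

-- the per-word replacement and the count, the common denominator of both sides
def fpRepl (palabra cambio w : String) : String := if w == palabra then cambio else w

def stA (palabra cambio : String) (st : List String × Int) (i : Int) : List String × Int :=
  if PySem.List.pyGet? st.1 i = some palabra then (st.1.set i.toNat cambio, st.2 + 1) else st

lemma frame_stA (palabra cambio a : String) (idxs : List Int) :
    ∀ (u : List String) (c : Int), (∀ i ∈ idxs, 0 ≤ i ∧ i.toNat < u.length) →
      idxs.foldl (stA palabra cambio) (u ++ [a], c)
        = ((idxs.foldl (stA palabra cambio) (u, c)).1 ++ [a],
           (idxs.foldl (stA palabra cambio) (u, c)).2) := by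
  induction idxs with
  | nil => intro u c _; rfl
  | cons i t ih =>
    intro u c hb
    obtain ⟨h0, hlt⟩ := hb i (List.mem_cons_self ..)
    have hget : PySem.List.pyGet? (u ++ [a]) i = PySem.List.pyGet? u i := by
      rw [PySem.List.pyGet?_of_nonneg _ h0, PySem.List.pyGet?_of_nonneg _ h0,
        List.getElem?_append_left hlt]
    have hset : (u ++ [a]).set i.toNat cambio = u.set i.toNat cambio ++ [a] := by
      rw [List.set_append]; simp [hlt]
    simp only [List.foldl_cons, stA, hget, hset]
    split_ifs with h
    · exact ih _ _ (fun j hj => by simpa using hb j (List.mem_cons_of_mem _ hj))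
    · exact ih _ _ (fun j hj => hb j (List.mem_cons_of_mem _ hj))

lemma loopA_eq (palabra cambio : String) (ws : List String) : ∀ c : Int,
    (PySem.List.pyRange 0 (ws.length) 1).foldl (stA palabra cambio) (ws, c)
      = (ws.map (fpRepl palabra cambio), c + (ws.count palabra : Int)) := by
  induction ws using List.reverseRecOn with
  | nil => intro c; simp [PySem.List.pyRange_one_eq_nil]
  | append_singleton ws a ih =>
    intro c
    have hn : ((ws ++ [a]).length : Int) = (ws.length : Int) + 1 := by simp
    have hsplit : PySem.List.pyRange 0 ((ws ++ [a]).length) 1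
        = PySem.List.pyRange 0 (ws.length) 1 ++ [(ws.length : Int)] := by
      rw [hn, PySem.List.pyRange_one_succ_right (by positivity)]
    rw [hsplit, List.foldl_append,
      frame_stA palabra cambio a _ ws c
        (fun i hi => by
          have := (PySem.List.mem_pyRange_one.mp hi)
          exact ⟨this.1, by omega⟩),
      ih c]
    have hgl : PySem.List.pyGet? (ws.map (fpRepl palabra cambio) ++ [a]) (ws.length : Int)
        = some a := by
      simpa using PySem.List.pyGet?_append_length (ws.map (fpRepl palabra cambio)) [] a

    have hsetlast : (ws.map (fpRepl palabra cambio) ++ [a]).set ((ws.length : Int)).toNat cambio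
        = ws.map (fpRepl palabra cambio) ++ [cambio] := by
      rw [List.set_append]; simp
    simp only [List.foldl_cons, List.foldl_nil, stA, hgl]
    by_cases h : a = palabra
    · rw [if_pos (by simp [h]), hsetlast]
      simp [h, fpRepl, List.count_append]
      ring
    · rw [if_neg (by simp [h])]
      simp [fpRepl, h, List.count_append]

lemma join_pair (x y : String) (rest : List String) :
    PySem.Str.join " " [x, PySem.Str.join " " (y :: rest)] = PySem.Str.join " " (x :: y :: rest) := by
  unfold PySem.Str.join
  simp [PySem.Chars.join_cons_cons]

lemma fpGo_eq (palabra cambio : String) (ws : List String) :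
    fpGo palabra cambio ws =
      (PySem.Str.join " " (ws.map (fpRepl palabra cambio)), (ws.count palabra : Int)) := by
  induction ws with
  | nil => simp [fpGo, PySem.Str.join]
  | cons w t ih =>
    cases t with
    | nil =>
      by_cases h : w = palabra <;> simp [fpGo, fpRepl, h, PySem.Str.join]
    | cons r rest =>
      simp only [fpGo, ih, List.map_cons]
      refine congrArg₂ Prod.mk ?_ ?_
      · rw [join_pair]
        simp [fpRepl]
      · by_cases hw : w = palabra <;> simp [List.count_cons, hw] <;> ring

-- ===== VERDICT =====
theorem filtrar_palabras_spec : Claim_equal_filtrar_palabras := by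
  intro frase palabra cambio _
  unfold Spec_filtrar_palabras filtrar_palabras filtrar_palabras_alt
  rw [fpGo_eq]
  by_cases h : palabra ∈ PySem.Str.split₀ frase
  · simp only [if_pos h]
    rw [show (fun (st : List String × Int) i =>
          if PySem.List.pyGet? st.1 i = some palabra then (st.1.set i.toNat cambio, st.2 + 1)
          else st) = stA palabra cambio from rfl]
    rw [loopA_eq]
    simp
  · have hm : List.map (fpRepl palabra cambio) (PySem.Str.split₀ frase)
        = PySem.Str.split₀ frase :=
      List.map_congr_left (fun w hw => by
        simp [fpRepl, show w ≠ palabra from fun e => h (e ▸ hw)]) |>.trans (List.map_id _)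
    simp [h, List.count_eq_zero_of_not_mem h, hm]
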